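-- pv_equiv track=rewrite | github.com/Magdamit173/Punnett_Square | app.py | sanitize_alleles
-- ===== SOURCE A (Python) =====
-- def sanitize_alleles(alleles):
--     list_of_duplicates = []
--     list_of_alleles = []
--
--     number_of_call = 0
--     overall_call = 0
--
--     for allele_index, allele in enumerate(list(alleles)):
--         for _allele_index, _allele in enumerate(list(alleles)):
--             if (
--                 (allele_index == _allele_index)
--                 or (allele_index in list_of_duplicates)
--                 or (_allele_index in list_of_duplicates)
--             ):
--                 continue
--
--             if allele.lower() == _allele.lower():
--                 list_of_duplicates.append(_allele_index)
--
--                 list_of_alleles.append(sorted([allele, _allele]))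
--
--     return list_of_alleles
-- ===== SOURCE B (Python) =====
-- def sanitize_alleles(alleles):
--     groups = {}
--     for a in list(alleles):
--         groups.setdefault(a.lower(), []).append(a)
--
--     result = []
--     for group in groups.values():
--         for member in group[1:]:
--             result.append(sorted([group[0], member]))
--     return result
-- ===== Notes on version B (the rewrite author's own statement) =====
-- stated objective: faster
-- what changed: Replaces A's quadratic nested index scans with a consumed-index list by a single grouping pass (dict: lowercase form -> members in encounter order) followed by one emission pass pairing each group's first member with every later member.
import Mathlib
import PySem

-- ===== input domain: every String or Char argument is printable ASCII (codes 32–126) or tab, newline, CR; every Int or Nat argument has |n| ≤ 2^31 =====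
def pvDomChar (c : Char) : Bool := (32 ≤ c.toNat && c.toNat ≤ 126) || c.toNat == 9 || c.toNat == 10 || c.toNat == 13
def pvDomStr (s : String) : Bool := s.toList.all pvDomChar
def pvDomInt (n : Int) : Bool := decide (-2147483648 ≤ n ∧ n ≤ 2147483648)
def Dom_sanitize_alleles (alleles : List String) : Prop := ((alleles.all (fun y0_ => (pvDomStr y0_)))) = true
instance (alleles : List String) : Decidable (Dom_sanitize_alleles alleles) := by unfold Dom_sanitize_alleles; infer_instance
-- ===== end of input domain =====

-- B replaces A's nested index scans with one grouping pass (dict lowercase-key -> members) and a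
-- direct emission pass over the groups; objective: faster (one grouping pass instead of the
-- quadratic re-scan with a consumed-index list).

-- sorted([a, b]) — used by both Pythons
def pvPair2 (a b : String) : List String := PySem.List.sorted [a, b] (fun x => x) false

-- ===== PORT A =====
-- (A's number_of_call / overall_call are assigned and never read; they do not affect the result)
def sanitize_alleles (alleles : List String) : List (List String) :=
  let st :=
    (PySem.List.enumerate alleles 0).foldl
      (fun st p =>
        (PySem.List.enumerate alleles 0).foldl
          (fun st q =>
            if p.1 == q.1 || st.1.contains p.1 || st.1.contains q.1 then st
            else if PySem.Str.lower p.2 == PySem.Str.lower q.2 then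
              (st.1 ++ [q.1], st.2 ++ [pvPair2 p.2 q.2])
            else st)
          st)
      (([] : List Int), ([] : List (List String)))
  st.2

-- ===== PORT B =====
def sanitize_alleles_alt (alleles : List String) : List (List String) :=
  let groups : PySem.Dict String (List String) :=
    alleles.foldl (fun d a => d.modify (PySem.Str.lower a) [] (· ++ [a])) PySem.Dict.empty
  (PySem.Dict.values groups).foldl
    (fun result g =>
      match g with
      | [] => result
      | rep :: rest => rest.foldl (fun result m => result ++ [pvPair2 rep m]) result)
    []

-- ===== PRECONDITION & SPEC =====
def Spec_sanitize_alleles (alleles : List String) (out : List (List String)) : Prop := out = sanitize_alleles_alt alleles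
instance (alleles : List String) (out : List (List String)) : Decidable (Spec_sanitize_alleles alleles out) := by unfold Spec_sanitize_alleles; infer_instance

-- ===== CLAIM (what is proved, stated in full; the proofs are below) =====
def Claim_equal_sanitize_alleles : Prop := ∀ (alleles : List String), Dom_sanitize_alleles alleles → Spec_sanitize_alleles alleles (sanitize_alleles alleles)

-- ===== LEMMAS AND PROOFS =====

-- A's inner-loop body, named for the lemmas (identical to the lambda in the port)
def pvInnerF (p : Int × String) (st : List Int × List (List String)) (q : Int × String) :
    List Int × List (List String) :=
  if p.1 == q.1 || st.1.contains p.1 || st.1.contains q.1 then st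
  else if PySem.Str.lower p.2 == PySem.Str.lower q.2 then
    (st.1 ++ [q.1], st.2 ++ [pvPair2 p.2 q.2])
  else st

def pvKey (q : Int × String) : String := PySem.Str.lower q.2

-- the inner-loop survivors for outer element p, given consumed-index list d
def pvSel (p : Int × String) (d : List Int) (l : List (Int × String)) : List (Int × String) :=
  l.filter (fun q => !(p.1 == q.1) && !(d.contains q.1) && (PySem.Str.lower p.2 == PySem.Str.lower q.2))

-- the inner-loop survivors when no same-key index is consumed yet
def pvContrib (E : List (Int × String)) (p : Int × String) : List (Int × String) :=
  E.filter (fun q => !(p.1 == q.1) && (PySem.Str.lower p.2 == PySem.Str.lower q.2))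

-- abstract trace of A's outer loop: seen = lowercase keys of the already-processed prefix
def pvRun (E : List (Int × String)) (seen : List String) : List (Int × String) → List (List String)
  | [] => []
  | p :: t =>
    (if pvKey p ∈ seen then [] else (pvContrib E p).map (fun q => pvPair2 p.2 q.2)) ++
      pvRun E (seen ++ [pvKey p]) t

-- the keys of S that are new relative to seen, in first-occurrence order
def pvNewOf (seen : List String) : List (Int × String) → List String
  | [] => []
  | p :: t => (if pvKey p ∈ seen then [] else [pvKey p]) ++ pvNewOf (seen ++ [pvKey p]) t

-- one group's output, from the members of the group (head = representative)
def pvG (g : List String) : List (List String) :=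
  match g with
  | [] => []
  | rep :: rest => rest.map (fun m => pvPair2 rep m)

-- one key's output, computed from the whole input list
def pvF (alleles : List String) (k : String) : List (List String) :=
  pvG (alleles.filter (fun m => PySem.Str.lower m == k))

lemma pvInner_id (p : Int × String) (d : List Int) (r : List (List String))
    (l : List (Int × String)) (hp : p.1 ∈ d) :
    l.foldl (pvInnerF p) (d, r) = (d, r) := by
  induction l with
  | nil => rfl
  | cons q t ih =>
    simpa [pvInnerF, hp] using ih

lemma pvInner_closed (p : Int × String) : ∀ (l : List (Int × String)),
    (l.map Prod.fst).Nodup →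
    ∀ (d : List Int) (r : List (List String)), p.1 ∉ d →
    l.foldl (pvInnerF p) (d, r) =
      (d ++ (pvSel p d l).map Prod.fst, r ++ (pvSel p d l).map (fun q => pvPair2 p.2 q.2)) := by
  intro l
  induction l with
  | nil => intro _ d r _; simp [pvSel]
  | cons q t ih =>
    intro hl d r hp
    have hq1 : q.1 ∉ t.map Prod.fst := (List.nodup_cons.mp hl).1
    have ht : (t.map Prod.fst).Nodup := (List.nodup_cons.mp hl).2
    by_cases h1 : p.1 = q.1
    · have hstep : pvInnerF p (d, r) q = (d, r) := by simp [pvInnerF, h1]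
      have hsel : pvSel p d (q :: t) = pvSel p d t := by simp [pvSel, h1]
      rw [List.foldl_cons, hstep, hsel, ih ht d r hp]
    · by_cases h2 : q.1 ∈ d
      · have hstep : pvInnerF p (d, r) q = (d, r) := by
          simp [pvInnerF, h2]
        have hsel : pvSel p d (q :: t) = pvSel p d t := by
          simp only [pvSel, List.filter_cons]
          have : (!(p.1 == q.1) && !(d.contains q.1) &&
              (PySem.Str.lower p.2 == PySem.Str.lower q.2)) = false := by
            simp; intro _ h; exact absurd h2 h
          rw [this]; simp
        rw [List.foldl_cons, hstep, hsel, ih ht d r hp]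
      · by_cases h3 : PySem.Str.lower p.2 = PySem.Str.lower q.2
        · have hstep : pvInnerF p (d, r) q = (d ++ [q.1], r ++ [pvPair2 p.2 q.2]) := by
            simp [pvInnerF, h1, h3]
            exact ⟨hp, h2⟩
          have hp' : p.1 ∉ d ++ [q.1] := by
            simp [hp, h1]
          have hself : pvSel p (d ++ [q.1]) t = pvSel p d t := by
            unfold pvSel
            apply List.filter_congr
            intro x hx
            have hxq : x.1 ≠ q.1 := by
              intro hc; exact hq1 (hc ▸ List.mem_map_of_mem hx)
            simp [hxq]
          have hsel : pvSel p d (q :: t) = q :: pvSel p d t := by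
            simp only [pvSel, List.filter_cons]
            have hcond : (!(p.1 == q.1) && !(d.contains q.1) &&
                (PySem.Str.lower p.2 == PySem.Str.lower q.2)) = true := by
              simp [h1, h3]; exact h2
            rw [hcond]
            simp
          rw [List.foldl_cons, hstep, ih ht (d ++ [q.1]) (r ++ [pvPair2 p.2 q.2]) hp', hself,
            hsel]
          simp
        · have hstep : pvInnerF p (d, r) q = (d, r) := by
            simp [pvInnerF, h1, h3]
          have hsel : pvSel p d (q :: t) = pvSel p d t := by
            simp [pvSel, h3]
          rw [List.foldl_cons, hstep, hsel, ih ht d r hp]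

lemma pvOuter (E : List (Int × String)) (hN : (E.map Prod.fst).Nodup) :
    ∀ (S P : List (Int × String)) (d : List Int) (r : List (List String)),
    E = P ++ S →
    (∀ j : Int, j ∈ d ↔ ∃ q, q ∈ E ∧ q.1 = j ∧ pvKey q ∈ P.map pvKey ∧
        E.find? (fun q' => pvKey q' == pvKey q) ≠ some q) →
    ∃ d', S.foldl (fun st p => E.foldl (pvInnerF p) st) (d, r) = (d', r ++ pvRun E (P.map pvKey) S) := by
  intro S
  induction S with
  | nil => intro P d r hE hd; exact ⟨d, by simp [pvRun]⟩
  | cons p t ih =>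
    intro P d r hE hd
    have hpE : p ∈ E := by rw [hE]; simp
    have hE' : E = (P ++ [p]) ++ t := by rw [hE]; simp
    have hinj : ∀ {a b : Int × String}, a ∈ E → b ∈ E → a.1 = b.1 → a = b :=
      fun ha hb hab => List.inj_on_of_nodup_map hN ha hb hab
    simp only [List.foldl_cons]
    by_cases hk : pvKey p ∈ P.map pvKey
    · -- p's key was already consumed: the inner loop is a no-op
      obtain ⟨y, hyP, hky⟩ := List.mem_map.mp hk
      have hfindSome : (P.find? (fun q' => pvKey q' == pvKey p)).isSome :=
        List.find?_isSome.mpr ⟨y, hyP, by simp [hky]⟩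
      obtain ⟨y₀, hy₀⟩ := Option.isSome_iff_exists.mp hfindSome
      have hy₀P : y₀ ∈ P := List.mem_of_find?_eq_some hy₀
      have hfind : E.find? (fun q' => pvKey q' == pvKey p) = some y₀ := by
        rw [hE, List.find?_append, hy₀]; rfl
      have hpP : p ∉ P := by
        intro hc
        have hN' := hN
        rw [hE, List.map_append, List.nodup_append] at hN'
        exact hN'.2.2 p.1 (List.mem_map_of_mem hc) p.1 (by simp) rfl
      have hy₀ne : y₀ ≠ p := fun he => hpP (he ▸ hy₀P)
      have hpd : p.1 ∈ d := (hd p.1).mpr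
        ⟨p, hpE, rfl, hk, by rw [hfind]; exact fun hc => hy₀ne (Option.some.inj hc)⟩
      rw [pvInner_id p d r E hpd]
      have hd' : ∀ j, j ∈ d ↔ ∃ q, q ∈ E ∧ q.1 = j ∧ pvKey q ∈ (P ++ [p]).map pvKey ∧
          E.find? (fun q' => pvKey q' == pvKey q) ≠ some q := by
        intro j
        rw [hd j]
        constructor
        · rintro ⟨q, h1, h2, h3, h4⟩
          exact ⟨q, h1, h2, by simp only [List.map_append, List.mem_append]; exact Or.inl h3, h4⟩
        · rintro ⟨q, h1, h2, h3, h4⟩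
          rcases (by simpa using h3 : pvKey q ∈ P.map pvKey ∨ pvKey q = pvKey p) with h | h
          · exact ⟨q, h1, h2, h, h4⟩
          · exact ⟨q, h1, h2, h ▸ hk, h4⟩
      obtain ⟨d', hfold⟩ := ih (P ++ [p]) d r hE' hd'
      refine ⟨d', ?_⟩
      rw [hfold]
      simp [pvRun, hk]
    · -- p is the first of a new key: the inner loop collects its whole group
      have hpd : p.1 ∉ d := by
        intro hc
        obtain ⟨q, h1, h2, h3, _⟩ := (hd p.1).mp hc
        have hqp : q = p := hinj h1 hpE h2
        rw [hqp] at h3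
        exact hk h3
      rw [pvInner_closed p E hN d r hpd]
      have hqd : ∀ q ∈ E, PySem.Str.lower p.2 = PySem.Str.lower q.2 → q.1 ∉ d := by
        intro q hq hkey hc
        obtain ⟨q', h1, h2, h3, _⟩ := (hd q.1).mp hc
        have hq'q : q' = q := hinj h1 hq h2
        rw [hq'q] at h3
        have : pvKey q = pvKey p := by simp [pvKey, hkey.symm]
        exact hk (this ▸ h3)
      have hsel : pvSel p d E = pvContrib E p := by
        unfold pvSel pvContrib
        refine List.filter_congr (fun q hq => ?_)
        by_cases hkey : PySem.Str.lower p.2 = PySem.Str.lower q.2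
        · have := hqd q hq hkey
          simp [this, hkey]
        · have hb : (PySem.Str.lower p.2 == PySem.Str.lower q.2) = false := by
            simpa using hkey
          rw [hb]
          simp
      rw [hsel]
      have hfind : E.find? (fun q' => pvKey q' == pvKey p) = some p := by
        rw [hE, List.find?_append]
        have hnone : P.find? (fun q' => pvKey q' == pvKey p) = none :=
          List.find?_eq_none.mpr (fun y hy => by
            simp only [beq_iff_eq]
            exact fun hc => hk (hc ▸ List.mem_map_of_mem hy))
        rw [hnone]
        simp
      have hd' : ∀ j, j ∈ d ++ (pvContrib E p).map Prod.fst ↔ ∃ q, q ∈ E ∧ q.1 = j ∧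
          pvKey q ∈ (P ++ [p]).map pvKey ∧
          E.find? (fun q' => pvKey q' == pvKey q) ≠ some q := by
        intro j
        rw [List.mem_append]
        constructor
        · rintro (hj | hj)
          · obtain ⟨q, h1, h2, h3, h4⟩ := (hd j).mp hj
            exact ⟨q, h1, h2, by simp only [List.map_append, List.mem_append]; exact Or.inl h3, h4⟩
          · obtain ⟨q, hqc, hq1⟩ := List.mem_map.mp hj
            have hqE : q ∈ E := List.mem_of_mem_filter hqc
            have hcond := List.of_mem_filter hqc
            simp only [Bool.and_eq_true, Bool.not_eq_true', beq_eq_false_iff_ne,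
              beq_iff_eq] at hcond
            have hkq : pvKey q = pvKey p := by simp [pvKey, hcond.2.symm]
            refine ⟨q, hqE, hq1, by simp [hkq], ?_⟩
            have hpred : (fun q' => pvKey q' == pvKey q) = (fun q' => pvKey q' == pvKey p) := by
              funext q'; rw [hkq]
            rw [hpred, hfind]
            intro hc
            exact hcond.1 (congrArg Prod.fst (Option.some.inj hc))
        · rintro ⟨q, h1, h2, h3, h4⟩
          rcases (by simpa using h3 : pvKey q ∈ P.map pvKey ∨ pvKey q = pvKey p) with h | h
          · exact Or.inl ((hd j).mpr ⟨q, h1, h2, h, h4⟩)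
          · right
            have hpred : (fun q' => pvKey q' == pvKey q) = (fun q' => pvKey q' == pvKey p) := by
              funext q'; rw [h]
            rw [hpred, hfind] at h4
            have hqp : q ≠ p := fun he => h4 (he ▸ rfl)
            have hne : p.1 ≠ q.1 := fun he => hqp (hinj h1 hpE he.symm)
            refine List.mem_map.mpr ⟨q, List.mem_filter.mpr ⟨h1, ?_⟩, h2⟩
            simp only [Bool.and_eq_true, Bool.not_eq_true', beq_eq_false_iff_ne, beq_iff_eq]
            refine ⟨hne, ?_⟩
            simp only [pvKey] at h
            exact h.symm
      obtain ⟨d', hfold⟩ := ih (P ++ [p]) (d ++ (pvContrib E p).map Prod.fst)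
        (r ++ (pvContrib E p).map (fun q => pvPair2 p.2 q.2)) hE' hd'
      refine ⟨d', ?_⟩
      rw [hfold]
      simp [pvRun, hk, List.append_assoc]

lemma pvRun_eq_flatMap (E : List (Int × String)) (hN : (E.map Prod.fst).Nodup) :
    ∀ (S P : List (Int × String)), E = P ++ S →
    pvRun E (P.map pvKey) S = (pvNewOf (P.map pvKey) S).flatMap (pvF (E.map Prod.snd)) := by
  intro S
  induction S with
  | nil => intro P _; simp [pvRun, pvNewOf]
  | cons p t ih =>
    intro P hE
    have hE' : E = (P ++ [p]) ++ t := by rw [hE]; simp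
    have hrec := ih (P ++ [p]) hE'
    rw [List.map_append, List.map_cons, List.map_nil] at hrec
    by_cases hk : pvKey p ∈ P.map pvKey
    · simp only [pvRun, pvNewOf, if_pos hk, List.nil_append]
      exact hrec
    · simp only [pvRun, pvNewOf, if_neg hk, List.singleton_append, List.flatMap_cons]
      rw [hrec]
      congr 1
      -- the head group: A's inner-loop survivors = tail of the lowercase-group of p
      have hPkey : ∀ y ∈ P, pvKey y ≠ pvKey p :=
        fun y hy he => hk (he ▸ List.mem_map_of_mem hy)
      have hpt : p.1 ∉ t.map Prod.fst := by
        have hN' := hN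
        rw [hE, List.map_append, List.nodup_append] at hN'
        exact (List.nodup_cons.mp hN'.2.1).1
      have hcontrib : pvContrib E p
          = t.filter (fun q => PySem.Str.lower p.2 == PySem.Str.lower q.2) := by
        unfold pvContrib
        rw [hE, List.filter_append, List.filter_cons]
        have h1 : P.filter
            (fun q => !(p.1 == q.1) && (PySem.Str.lower p.2 == PySem.Str.lower q.2)) = [] := by
          refine List.filter_eq_nil_iff.mpr (fun y hy => ?_)
          have := hPkey y hy
          simp [pvKey] at this
          simp
          exact fun _ hc => this hc.symm
        have h2 : (!(p.1 == p.1) &&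
            (PySem.Str.lower p.2 == PySem.Str.lower p.2)) = false := by simp
        rw [h1, h2]
        simp only [List.nil_append, if_neg (by simp : ¬((false : Bool) = true))]
        refine List.filter_congr (fun q hq => ?_)
        have hne : p.1 ≠ q.1 := fun hc => hpt (hc ▸ List.mem_map_of_mem hq)
        simp [hne]
      have hfil : (E.map Prod.snd).filter (fun m => PySem.Str.lower m == pvKey p)
          = p.2 :: (t.filter (fun q => PySem.Str.lower p.2 == PySem.Str.lower q.2)).map Prod.snd := by
        rw [hE]
        simp only [List.map_append, List.map_cons, List.filter_append, List.filter_cons]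
        have h1 : (P.map Prod.snd).filter (fun m => PySem.Str.lower m == pvKey p) = [] := by
          rw [List.filter_map]
          refine List.map_eq_nil_iff.mpr (List.filter_eq_nil_iff.mpr (fun y hy => ?_))
          have := hPkey y hy
          simp [pvKey] at this ⊢
          exact fun hc => this hc
        have h2 : (PySem.Str.lower p.2 == pvKey p) = true := by simp [pvKey]
        rw [h1, List.filter_map, List.nil_append, if_pos h2]
        congr 1
        congr 1
        refine List.filter_congr (fun q hq => ?_)
        simp [pvKey, Function.comp]
        constructor
        · exact fun h => h.symm
        · exact fun h => h.symm
      rw [pvF, hfil, pvG, hcontrib, List.map_map]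
      rfl

lemma pvPrefix_foldl_add (l : List String) (s : List String) :
    s <+: l.foldl PySem.Set.add s := by
  induction l generalizing s with
  | nil => exact List.prefix_refl s
  | cons x t ih =>
    rw [List.foldl_cons]
    refine List.IsPrefix.trans ?_ (ih (PySem.Set.add s x))
    rw [PySem.Set.add_eq_ite]
    split
    · exact List.prefix_refl s
    · exact ⟨[x], rfl⟩

lemma pvNewOf_eq (S : List (Int × String)) :
    ∀ (seen1 seen2 : List String), (∀ x, x ∈ seen1 ↔ x ∈ seen2) → seen2.Nodup →
    pvNewOf seen1 S = ((S.map pvKey).foldl PySem.Set.add seen2).drop seen2.length := by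
  induction S with
  | nil => intro s1 s2 h hn; simp [pvNewOf, List.drop_length]
  | cons p t ih =>
    intro s1 s2 h hn
    by_cases hk : pvKey p ∈ s1
    · have hk2 : pvKey p ∈ s2 := (h _).mp hk
      simp only [pvNewOf, if_pos hk, List.map_cons, List.foldl_cons, List.nil_append]
      rw [PySem.Set.add_of_mem hk2]
      exact ih (s1 ++ [pvKey p]) s2 (by intro x; rw [List.mem_append, h x, List.mem_singleton]; exact ⟨fun hx => hx.elim id (fun e => e ▸ hk2), Or.inl⟩) hn
    · have hk2 : pvKey p ∉ s2 := fun c => hk ((h _).mpr c)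
      simp only [pvNewOf, if_neg hk, List.map_cons, List.foldl_cons]
      rw [PySem.Set.add_of_not_mem hk2]
      have hn' : (s2 ++ [pvKey p]).Nodup := by simp [List.nodup_append, hn]; exact fun a ha he => hk2 (he ▸ ha)
      rw [ih (s1 ++ [pvKey p]) (s2 ++ [pvKey p]) (by intro x; rw [List.mem_append, List.mem_append, h x]) hn']
      obtain ⟨u, hu⟩ := pvPrefix_foldl_add (t.map pvKey) (s2 ++ [pvKey p])
      rw [← hu]
      rw [List.drop_left]
      have : (s2 ++ [pvKey p]) ++ u = s2 ++ (pvKey p :: u) := by simp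
      rw [this, List.drop_left]
      simp

lemma pvA_eq (alleles : List String) :
    sanitize_alleles alleles =
      (PySem.Set.ofList (alleles.map (fun a => PySem.Str.lower a))).flatMap (pvF alleles) := by
  have hbridge : sanitize_alleles alleles =
      ((PySem.List.enumerate alleles 0).foldl
        (fun st p => (PySem.List.enumerate alleles 0).foldl (pvInnerF p) st)
        (([] : List Int), ([] : List (List String)))).2 := rfl
  have hN : ((PySem.List.enumerate alleles 0).map Prod.fst).Nodup := by
    have h := PySem.List.map_fst_enumerate alleles 0
    simp only [show (fun x : Int × String => x.1) = Prod.fst from rfl] at h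
    rw [h]
    exact PySem.List.nodup_pyRange_one _ _
  obtain ⟨d', hfold⟩ := pvOuter _ hN (PySem.List.enumerate alleles 0) [] [] []
    (by simp) (by intro j; simp)
  rw [hbridge, hfold]
  simp only [List.map_nil, List.nil_append]
  have h1 := pvRun_eq_flatMap _ hN (PySem.List.enumerate alleles 0) [] (by simp)
  simp only [List.map_nil] at h1
  rw [h1, pvNewOf_eq _ [] [] (fun x => Iff.rfl) List.nodup_nil]
  simp only [List.length_nil, List.drop_zero]
  have h2 : (PySem.List.enumerate alleles 0).map pvKey
      = alleles.map (fun a => PySem.Str.lower a) := by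
    have hc : pvKey = (fun a => PySem.Str.lower a) ∘ (fun x : Int × String => x.2) := rfl
    rw [hc, ← List.map_map, PySem.List.map_snd_enumerate]
  have h3 : (PySem.List.enumerate alleles 0).map Prod.snd = alleles :=
    PySem.List.map_snd_enumerate alleles 0
  rw [h2, h3, ← PySem.Set.ofList_eq_foldl]

lemma pvB_eq (alleles : List String) :
    sanitize_alleles_alt alleles =
      (PySem.Set.ofList (alleles.map (fun a => PySem.Str.lower a))).flatMap (pvF alleles) := by
  have hzeta : sanitize_alleles_alt alleles =
      ((alleles.foldl (fun d a => d.modify (PySem.Str.lower a) [] (· ++ [a]))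
          PySem.Dict.empty).values).foldl
        (fun result g =>
          match g with
          | [] => result
          | rep :: rest => rest.foldl (fun result m => result ++ [pvPair2 rep m]) result)
        [] := rfl
  rw [hzeta]
  have hfold : alleles.foldl (fun d a => d.modify (PySem.Str.lower a) [] (· ++ [a]))
        PySem.Dict.empty
      = (alleles.map (fun a => (PySem.Str.lower a, a))).foldl
          (fun d p => d.modify p.1 [] (· ++ [p.2])) PySem.Dict.empty := by
    rw [List.foldl_map]
  have hkeys : (alleles.foldl (fun d a => d.modify (PySem.Str.lower a) [] (· ++ [a]))
        PySem.Dict.empty).keys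
      = PySem.Set.ofList (alleles.map (fun a => PySem.Str.lower a)) := by
    have h := PySem.Dict.keys_foldl_modify_key alleles (fun a => PySem.Str.lower a)
      ([] : List String) (fun _ a => (· ++ [a])) PySem.Dict.empty
    rw [h, PySem.Dict.keys_empty]
    rw [PySem.Set.ofList_eq_foldl]
    rfl
  have hnodup : (alleles.foldl (fun d a => d.modify (PySem.Str.lower a) [] (· ++ [a]))
        PySem.Dict.empty).keys.Nodup := by
    rw [hkeys]
    exact PySem.Set.nodup_ofList _
  have hgetD : ∀ k, (alleles.foldl (fun d a => d.modify (PySem.Str.lower a) [] (· ++ [a]))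
        PySem.Dict.empty).getD k []
      = alleles.filter (fun m => PySem.Str.lower m == k) := by
    intro k
    rw [hfold, PySem.Dict.getD_foldl_modify_append, PySem.Dict.getD_empty, List.nil_append]
    rw [List.filter_map (p := fun p => p.1 == k) (f := fun a => (PySem.Str.lower a, a))]
    rw [List.map_map]
    have : ((fun x : String × String => x.2) ∘ fun a => (PySem.Str.lower a, a)) = id := rfl
    rw [this, List.map_id]
    rfl
  rw [PySem.Dict.values_eq_map_keys _ hnodup []]
  have hloop : (fun (result : List (List String)) (g : List String) =>
      match g with
      | [] => result
      | rep :: rest => rest.foldl (fun result m => result ++ [pvPair2 rep m]) result)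
      = fun result g => result ++ pvG g := by
    funext result g
    cases g with
    | nil => simp [pvG]
    | cons rep rest =>
      show rest.foldl (fun result m => result ++ [pvPair2 rep m]) result = result ++ pvG (rep :: rest)
      rw [PySem.List.foldl_append_singleton_eq_map (fun m => pvPair2 rep m)]
      rfl
  rw [hloop, PySem.List.foldl_append_eq_flatMap, List.nil_append, List.flatMap_map]
  rw [hkeys]
  apply List.flatMap_congr
  intro k _
  rw [hgetD k]
  rfl

-- ===== VERDICT (by name: the statement is the Claim_ definition above) =====
theorem sanitize_alleles_spec : Claim_equal_sanitize_alleles := by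
  intro alleles _
  unfold Spec_sanitize_alleles
  rw [pvA_eq, pvB_eq]
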